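-- pv_equiv track=rewrite | github.com/pypi-data/pypi-mirror-403 | packages/ssi-empoorio-id/ssi_empoorio_id-1.0.1.tar.gz/ssi_empoorio_id-1.0.1/ssi_empoorio_id/presenter.py | _validate_did_format
-- ===== SOURCE A (Python) =====
-- def _validate_did_format(did: str) -> bool:
--     """Validate DID format"""
--     if not did or not isinstance(did, str):
--         return False
--
--     # Basic DID format validation
--     if not did.startswith('did:'):
--         return False
--
--     parts = did.split(':')
--     if len(parts) < 3:
--         return False
--
--     # For SSI Empoorio, we expect did:emp: format
--     if parts[0] != 'did' or parts[1] != 'emp':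
--         return False
--
--     # Check identifier format (basic validation)
--     identifier = parts[2]
--     if not identifier or len(identifier) > 256:
--         return False
--
--     # Allow alphanumeric, hyphens, underscores, dots
--     allowed_chars = set('abcdefghijklmnopqrstuvwxyzABCDEFGHIJKLMNOPQRSTUVWXYZ0123456789-_.')
--
--     return all(c in allowed_chars for c in identifier)
-- ===== SOURCE B (Python) =====
-- def _allowed_char(c):
--     return 'a' <= c <= 'z' or 'A' <= c <= 'Z' or '0' <= c <= '9' or c in '-_.'
--
--
-- def _validate_did_format(did: str) -> bool:
--     """Validate DID format (single guarded prefix check + one forward scan, no split)."""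
--     if not isinstance(did, str) or not did.startswith('did:emp:'):
--         return False
--     n = 0
--     for c in did[8:]:
--         if c == ':':
--             break
--         if not _allowed_char(c):
--             return False
--         n += 1
--     return 1 <= n <= 256
-- ===== Notes on version B (the rewrite author's own statement) =====
-- stated objective: alternative
-- what changed: B replaces A's split-the-whole-string-on-':'-then-inspect-three-parts approach by a single guarded prefix check ('did:emp:') followed by one forward scan of the identifier that validates each character and counts its length, stopping at the first ':'; no part list is ever built.
import Mathlib
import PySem

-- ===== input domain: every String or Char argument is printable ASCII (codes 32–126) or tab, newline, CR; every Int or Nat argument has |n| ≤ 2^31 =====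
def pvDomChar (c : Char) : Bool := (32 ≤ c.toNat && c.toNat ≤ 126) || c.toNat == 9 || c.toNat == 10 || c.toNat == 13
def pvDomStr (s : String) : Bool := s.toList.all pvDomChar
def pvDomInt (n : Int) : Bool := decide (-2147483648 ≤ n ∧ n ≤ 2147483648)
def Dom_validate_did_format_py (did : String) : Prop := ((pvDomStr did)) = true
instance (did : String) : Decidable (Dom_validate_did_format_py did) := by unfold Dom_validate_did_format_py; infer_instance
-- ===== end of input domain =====

-- B replaces A's split-on-':' + three-part inspection by a 'did:emp:' prefix check and a
-- single counting forward scan of the identifier (objective: alternative, same O(n) cost).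

-- ===== PORT A =====
def validate_did_format_py (did : String) : Bool :=
  -- `not did` = empty string; `isinstance(did, str)` is always true here
  if did.toList = [] then false
  else if !(PySem.Str.startswith did "did:") then false
  else
    let parts := PySem.Chars.splitOn did.toList ":".toList    -- did.split(':')
    if parts.length < 3 then false
    else if PySem.List.pyGetD parts 0 [] ≠ "did".toList ∨ PySem.List.pyGetD parts 1 [] ≠ "emp".toList then false
    else
      let identifier := PySem.List.pyGetD parts 2 []
      if identifier = [] ∨ identifier.length > 256 then false
      else
        let allowed : PySem.Set Char :=
          PySem.Set.ofList "abcdefghijklmnopqrstuvwxyzABCDEFGHIJKLMNOPQRSTUVWXYZ0123456789-_.".toList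
        identifier.all (fun c => PySem.Set.contains allowed c)

-- ===== PORT B =====
-- helper `_allowed_char` of Source B
def pvAllowedChar (c : Char) : Bool :=
  decide ('a' ≤ c) && decide (c ≤ 'z') || decide ('A' ≤ c) && decide (c ≤ 'Z') ||
    decide ('0' ≤ c) && decide (c ≤ '9') || PySem.Chars.isIn [c] "-_.".toList

-- the `for c in did[8:]` loop with counter n, `break` on ':' and early `return False`
def pvAltLoop : List Char → Nat → Bool
  | [], n => decide (1 ≤ n ∧ n ≤ 256)
  | c :: cs, n =>
    if c = ':' then decide (1 ≤ n ∧ n ≤ 256)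
    else if !(pvAllowedChar c) then false
    else pvAltLoop cs (n + 1)

def validate_did_format_py_alt (did : String) : Bool :=
  if !(PySem.Str.startswith did "did:emp:") then false
  else pvAltLoop (PySem.List.slice did.toList (some 8) none) 0

-- ===== PRECONDITION & SPEC =====
def Spec_validate_did_format_py (did : String) (out : Bool) : Prop := out = validate_did_format_py_alt did
instance (did : String) (out : Bool) : Decidable (Spec_validate_did_format_py did out) := by unfold Spec_validate_did_format_py; infer_instance

-- ===== CLAIM (what is proved, stated in full; the proofs are below) =====
def Claim_equal_validate_did_format_py : Prop := ∀ (did : String), Dom_validate_did_format_py did → Spec_validate_did_format_py did (validate_did_format_py did)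

-- ===== LEMMAS AND PROOFS =====

-- reference form of : head segment, then the split of what follows the first ':'
def pvS (l : List Char) : List (List Char) :=
  l.takeWhile (· ≠ ':') ::
    (if h : l.dropWhile (· ≠ ':') = [] then []
     else pvS (l.dropWhile (· ≠ ':')).tail)
termination_by l.length
decreasing_by
  have hs := (List.dropWhile_sublist (l := l) (p := (· ≠ ':'))).length_le
  cases hd : l.dropWhile (· ≠ ':') with
  | nil => exact absurd hd h
  | cons a t => simp_all <;> omega

lemma pvS_nil : pvS [] = [[]] := by simp [pvS]

lemma pvS_colon (r : List Char) : pvS (':' :: r) = [] :: pvS r := by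
  rw [pvS]; simp

lemma pvS_head (l : List Char) : (pvS l).headI = l.takeWhile (· ≠ ':') := by
  rw [pvS]; rfl

lemma pvS_ne_nil (l : List Char) : pvS l ≠ [] := by
  rw [pvS]; simp

lemma pvS_cons {c : Char} (r : List Char) (h : c ≠ ':') :
    pvS (c :: r) = (c :: r.takeWhile (· ≠ ':')) :: (pvS r).tail := by
  rw [pvS, List.takeWhile_cons_of_pos (by simp [h]), List.dropWhile_cons_of_pos (by simp [h])]
  conv_rhs => rw [pvS]
  rfl

lemma pv_go (fuel : Nat) (l cur : List Char) (acc : List (List Char)) (hf : l.length < fuel) :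
    PySem.Chars.splitOn.go [':'] fuel l cur acc
      = acc.reverse ++ (pvS l).modifyHead (fun x => cur.reverse ++ x) := by
  induction fuel generalizing l cur acc with
  | zero => omega
  | succ f ih =>
    rw [PySem.Chars.splitOn.go.eq_def]
    cases l with
    | nil => simp [pvS_nil]
    | cons c rest =>
      simp only [List.length_cons] at hf
      by_cases hc : c = ':'
      · subst hc
        have hpre : List.isPrefixOf [':'] (':' :: rest) = true := by simp [List.isPrefixOf]
        simp only [hpre, if_true]
        rw [show List.drop [':'].length (':' :: rest) = rest from rfl]
        rw [ih rest [] (cur.reverse :: acc) (by omega)]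
        rw [pvS_colon]
        simp
        rw [show (fun x : List Char => x) = @id (List Char) from rfl, List.modifyHead_id]
        rfl
      · have hpre : List.isPrefixOf [':'] (c :: rest) = false := by
          simp [List.isPrefixOf]
          exact fun hcc => absurd hcc.symm hc
        simp only [hpre, Bool.false_eq_true, if_false]
        rw [ih rest (c :: cur) acc (by omega)]
        rw [pvS_cons rest hc, pvS]
        cases hd : rest.dropWhile (· ≠ ':') with
        | nil => simp [hd]
        | cons a t => simp [hd]

lemma pv_splitOn (l : List Char) : PySem.Chars.splitOn l [':'] = pvS l := by
  rw [PySem.Chars.splitOn, pv_go (l.length + 1) l [] [] (by omega)]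
  simp
  rw [show (fun x : List Char => x) = @id (List Char) from rfl, List.modifyHead_id]
  rfl

lemma pvS_append (a r : List Char) (h : ':' ∉ a) : pvS (a ++ ':' :: r) = a :: pvS r := by
  induction a with
  | nil => simpa using pvS_colon r
  | cons c a' ih =>
    have hc : c ≠ ':' := fun hcc => h (hcc ▸ List.mem_cons_self ..)
    have ih' := ih (fun hm => h (List.mem_cons_of_mem _ hm))
    rw [List.cons_append, pvS_cons _ hc]
    have hhd : (a' ++ ':' :: r).takeWhile (· ≠ ':') = (pvS (a' ++ ':' :: r)).headI :=
      (pvS_head _).symm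
    rw [hhd, ih']
    simp

lemma pv_dropWhile_head {l d : List Char} {x : Char} (h : l.dropWhile (· ≠ ':') = x :: d) :
    x = ':' := by
  induction l with
  | nil => simp at h
  | cons c cs ih =>
    by_cases hc : c = ':'
    · rw [List.dropWhile_cons_of_neg (by simp [hc])] at h
      injection h with h1 _
      rw [← h1, hc]
    · rw [List.dropWhile_cons_of_pos (by simp [hc])] at h
      exact ih h

lemma pvAltLoop_eq (l : List Char) (n : Nat) :
    pvAltLoop l n =
      if (l.takeWhile (· ≠ ':')).all pvAllowedChar then
        decide (1 ≤ n + (l.takeWhile (· ≠ ':')).length ∧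
                n + (l.takeWhile (· ≠ ':')).length ≤ 256)
      else false := by
  induction l generalizing n with
  | nil => simp [pvAltLoop]
  | cons c cs ih =>
    by_cases hc : c = ':'
    · subst hc
      simp [pvAltLoop]
    · by_cases hchk : pvAllowedChar c = true
      · rw [show pvAltLoop (c :: cs) n = pvAltLoop cs (n + 1) by simp [pvAltLoop, hc, hchk]]
        rw [ih (n + 1)]
        simp only [List.takeWhile_cons, hc, decide_true, ne_eq, not_false_iff, List.all_cons,
          hchk, Bool.true_and, List.length_cons, if_true]
        split_ifs with hall
        · rw [decide_eq_decide]
          omega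
        · rfl
      · rw [show pvAltLoop (c :: cs) n = false by simp [pvAltLoop, hc, hchk]]
        simp [hc, List.all_cons, hchk]

lemma pv_isIn_eq (c : Char) :
    PySem.Chars.isIn [c] "-_.".toList = (decide (c = '-') || decide (c = '_') || decide (c = '.')) := by
  rw [show ("-_.").toList = ['-', '_', '.'] from rfl, Bool.eq_iff_iff,
    PySem.Chars.isIn_iff_infix]
  simp only [Bool.or_eq_true, decide_eq_true_eq]
  rw [or_assoc]
  constructor
  · intro h
    have hc : c ∈ ['-', '_', '.'] := h.subset (List.mem_singleton_self c)
    simpa using hc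
  · rintro (rfl | rfl | rfl)
    · exact ⟨[], ['_', '.'], rfl⟩
    · exact ⟨['-'], ['.'], rfl⟩
    · exact ⟨['-', '_'], [], rfl⟩

lemma pv_char_eq_iff (c d : Char) : c = d ↔ c.toNat = d.toNat := by
  rw [Char.ext_iff, ← UInt32.toNat_inj]; rfl

lemma pv_char_le_iff (c d : Char) : c ≤ d ↔ c.toNat ≤ d.toNat := by
  rw [Char.le_def, UInt32.le_iff_toNat_le]
  exact Iff.rfl

lemma pv_contains_eq (c : Char) :
    PySem.Set.contains
      (PySem.Set.ofList "abcdefghijklmnopqrstuvwxyzABCDEFGHIJKLMNOPQRSTUVWXYZ0123456789-_.".toList) c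
      = pvAllowedChar c := by
  rw [Bool.eq_iff_iff]
  have hmem : PySem.Set.contains
      (PySem.Set.ofList "abcdefghijklmnopqrstuvwxyzABCDEFGHIJKLMNOPQRSTUVWXYZ0123456789-_.".toList) c
      = true ↔ c ∈ ("abcdefghijklmnopqrstuvwxyzABCDEFGHIJKLMNOPQRSTUVWXYZ0123456789-_.").toList := by
    unfold PySem.Set.contains
    rw [List.contains_iff_mem]
    exact PySem.Set.mem_ofList _ _
  rw [hmem]
  rw [show ("abcdefghijklmnopqrstuvwxyzABCDEFGHIJKLMNOPQRSTUVWXYZ0123456789-_.").toList =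
      ['a', 'b', 'c', 'd', 'e', 'f', 'g', 'h', 'i', 'j', 'k', 'l', 'm', 'n', 'o', 'p', 'q', 'r',
       's', 't', 'u', 'v', 'w', 'x', 'y', 'z', 'A', 'B', 'C', 'D', 'E', 'F', 'G', 'H', 'I', 'J',
       'K', 'L', 'M', 'N', 'O', 'P', 'Q', 'R', 'S', 'T', 'U', 'V', 'W', 'X', 'Y', 'Z', '0', '1',
       '2', '3', '4', '5', '6', '7', '8', '9', '-', '_', '.'] from rfl]
  simp only [pvAllowedChar, pv_isIn_eq, Bool.or_eq_true, Bool.and_eq_true, decide_eq_true_eq,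
    List.mem_cons, List.not_mem_nil, or_false, pv_char_eq_iff, pv_char_le_iff,
    show ('a':Char).toNat = 97 from rfl,
    show ('b':Char).toNat = 98 from rfl,
    show ('c':Char).toNat = 99 from rfl,
    show ('d':Char).toNat = 100 from rfl,
    show ('e':Char).toNat = 101 from rfl,
    show ('f':Char).toNat = 102 from rfl,
    show ('g':Char).toNat = 103 from rfl,
    show ('h':Char).toNat = 104 from rfl,
    show ('i':Char).toNat = 105 from rfl,
    show ('j':Char).toNat = 106 from rfl,
    show ('k':Char).toNat = 107 from rfl,
    show ('l':Char).toNat = 108 from rfl,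
    show ('m':Char).toNat = 109 from rfl,
    show ('n':Char).toNat = 110 from rfl,
    show ('o':Char).toNat = 111 from rfl,
    show ('p':Char).toNat = 112 from rfl,
    show ('q':Char).toNat = 113 from rfl,
    show ('r':Char).toNat = 114 from rfl,
    show ('s':Char).toNat = 115 from rfl,
    show ('t':Char).toNat = 116 from rfl,
    show ('u':Char).toNat = 117 from rfl,
    show ('v':Char).toNat = 118 from rfl,
    show ('w':Char).toNat = 119 from rfl,
    show ('x':Char).toNat = 120 from rfl,
    show ('y':Char).toNat = 121 from rfl,
    show ('z':Char).toNat = 122 from rfl,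
    show ('A':Char).toNat = 65 from rfl,
    show ('B':Char).toNat = 66 from rfl,
    show ('C':Char).toNat = 67 from rfl,
    show ('D':Char).toNat = 68 from rfl,
    show ('E':Char).toNat = 69 from rfl,
    show ('F':Char).toNat = 70 from rfl,
    show ('G':Char).toNat = 71 from rfl,
    show ('H':Char).toNat = 72 from rfl,
    show ('I':Char).toNat = 73 from rfl,
    show ('J':Char).toNat = 74 from rfl,
    show ('K':Char).toNat = 75 from rfl,
    show ('L':Char).toNat = 76 from rfl,
    show ('M':Char).toNat = 77 from rfl,
    show ('N':Char).toNat = 78 from rfl,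
    show ('O':Char).toNat = 79 from rfl,
    show ('P':Char).toNat = 80 from rfl,
    show ('Q':Char).toNat = 81 from rfl,
    show ('R':Char).toNat = 82 from rfl,
    show ('S':Char).toNat = 83 from rfl,
    show ('T':Char).toNat = 84 from rfl,
    show ('U':Char).toNat = 85 from rfl,
    show ('V':Char).toNat = 86 from rfl,
    show ('W':Char).toNat = 87 from rfl,
    show ('X':Char).toNat = 88 from rfl,
    show ('Y':Char).toNat = 89 from rfl,
    show ('Z':Char).toNat = 90 from rfl,
    show ('0':Char).toNat = 48 from rfl,
    show ('1':Char).toNat = 49 from rfl,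
    show ('2':Char).toNat = 50 from rfl,
    show ('3':Char).toNat = 51 from rfl,
    show ('4':Char).toNat = 52 from rfl,
    show ('5':Char).toNat = 53 from rfl,
    show ('6':Char).toNat = 54 from rfl,
    show ('7':Char).toNat = 55 from rfl,
    show ('8':Char).toNat = 56 from rfl,
    show ('9':Char).toNat = 57 from rfl,
    show ('-':Char).toNat = 45 from rfl,
    show ('_':Char).toNat = 95 from rfl,
    show ('.':Char).toNat = 46 from rfl]
  omega

-- Python indexing of the first three segments (in-range numeral indices)
lemma pv_getD0 {α : Type} (x0 : α) (t : List α) (d : α) :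
    PySem.List.pyGetD (x0 :: t) 0 d = x0 := by
  simp [PySem.List.pyGetD_ofNat']

lemma pv_getD1 {α : Type} (x0 x1 : α) (t : List α) (d : α) :
    PySem.List.pyGetD (x0 :: x1 :: t) 1 d = x1 := by
  simp [PySem.List.pyGetD_ofNat']

lemma pv_getD2 {α : Type} (x0 x1 x2 : α) (t : List α) (d : α) :
    PySem.List.pyGetD (x0 :: x1 :: x2 :: t) 2 d = x2 := by
  simp [PySem.List.pyGetD_ofNat']

-- the final boolean comparison once both sides speak about the identifier T
lemma pv_final (T : List Char) (a : Bool) (hnil : T = [] → a = true) :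
    (if T = [] ∨ T.length > 256 then false else a)
      = (if a = true then decide (1 ≤ 0 + T.length ∧ 0 + T.length ≤ 256) else false) := by
  by_cases h2 : a = true
  · by_cases h1 : T = [] ∨ T.length > 256
    · rw [if_pos h1, if_pos h2]
      rcases h1 with rfl | h1
      · simp
      · symm
        rw [decide_eq_false_iff_not]
        omega
    · rw [if_neg h1, if_pos h2, h2]
      push_neg at h1
      have h1l : 0 < T.length := List.length_pos_of_ne_nil h1.1
      symm
      rw [decide_eq_true_eq]
      omega
  · rw [if_neg h2]
    have h2f : a = false := by simpa using h2
    by_cases h1 : T = [] ∨ T.length > 256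
    · rw [if_pos h1]
    · rw [if_neg h1]
      exact h2f

-- the main case: did = "did:emp:" ++ rest
lemma pv_main (did : String) (rest : List Char) (hl : did.toList = "did:emp:".toList ++ rest) :
    validate_did_format_py did = validate_did_format_py_alt did := by
  have hsw8 : PySem.Str.startswith did "did:emp:" = true := by
    simp only [PySem.Str.startswith_eq, PySem.Chars.startswith, hl]
    exact List.isPrefixOf_iff_prefix.mpr ⟨rest, rfl⟩
  have hsw4 : PySem.Str.startswith did "did:" = true := by
    simp only [PySem.Str.startswith_eq, PySem.Chars.startswith, hl,
      show ("did:emp:").toList ++ rest = "did:".toList ++ ("emp:".toList ++ rest) from rfl]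
    exact List.isPrefixOf_iff_prefix.mpr ⟨"emp:".toList ++ rest, rfl⟩
  have hne : ¬ (did.toList = []) := by rw [hl]; simp
  obtain ⟨T, tail, hS⟩ : ∃ h t, pvS rest = h :: t := by
    cases hSr : pvS rest with
    | nil => exact absurd hSr (pvS_ne_nil rest)
    | cons x xs => exact ⟨x, xs, rfl⟩
  have hT : T = rest.takeWhile (· ≠ ':') := by
    have := pvS_head rest
    rw [hS] at this
    simpa using this
  have hsplit : PySem.Chars.splitOn did.toList ":".toList
      = ['d', 'i', 'd'] :: ['e', 'm', 'p'] :: T :: tail := by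
    rw [show (":").toList = [':'] from rfl, pv_splitOn, hl]
    rw [show ("did:emp:").toList ++ rest
        = ['d', 'i', 'd'] ++ ':' :: (['e', 'm', 'p'] ++ ':' :: rest) from rfl]
    rw [pvS_append _ _ (by decide), pvS_append _ _ (by decide), hS]
  -- reduce the A side
  rw [validate_did_format_py]
  rw [if_neg hne]
  simp only [hsw4, Bool.not_true, Bool.false_eq_true, if_false, hsplit]
  rw [if_neg (by simp only [List.length_cons]; omega)]
  rw [if_neg (by
    push_neg
    exact ⟨by rw [pv_getD0]; exact rfl, by rw [pv_getD1]; exact rfl⟩)]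
  rw [pv_getD2]
  -- reduce the B side
  rw [validate_did_format_py_alt]
  simp only [hsw8, Bool.not_true, Bool.false_eq_true, if_false]
  rw [show PySem.List.slice did.toList (some 8) none = rest by
    rw [PySem.List.slice_from _ (by omega : (0:Int) ≤ 8), hl]
    exact List.drop_left' (by rfl)]
  rw [pvAltLoop_eq, ← hT]
  simp only [pv_contains_eq]
  exact pv_final T (T.all pvAllowedChar) (by rintro rfl; rfl)

-- the off-prefix case: A also returns false
lemma pv_off (did : String) (hp : PySem.Str.startswith did "did:emp:" = false) :
    validate_did_format_py did = false := by
  rw [validate_did_format_py]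
  by_cases h0 : did.toList = []
  · rw [if_pos h0]
  · rw [if_neg h0]
    cases h4 : PySem.Str.startswith did "did:" with
    | false => simp
    | true =>
      simp only [Bool.not_true, Bool.false_eq_true, if_false]
      obtain ⟨rest, hrest⟩ : ∃ rest, did.toList = "did:".toList ++ rest := by
        rw [PySem.Str.startswith_eq] at h4
        obtain ⟨r, hr⟩ := List.isPrefixOf_iff_prefix.mp h4
        exact ⟨r, hr.symm⟩
      obtain ⟨T, tail, hS⟩ : ∃ h t, pvS rest = h :: t := by
        cases hSr : pvS rest with
        | nil => exact absurd hSr (pvS_ne_nil rest)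
        | cons x xs => exact ⟨x, xs, rfl⟩
      have hT : T = rest.takeWhile (· ≠ ':') := by
        have := pvS_head rest
        rw [hS] at this
        simpa using this
      have hsplit : PySem.Chars.splitOn did.toList ":".toList = ['d', 'i', 'd'] :: T :: tail := by
        rw [show (":").toList = [':'] from rfl, pv_splitOn, hrest]
        rw [show ("did:").toList ++ rest = ['d', 'i', 'd'] ++ ':' :: rest from rfl]
        rw [pvS_append _ _ (by decide), hS]
      simp only [hsplit]
      by_cases hlen : (['d', 'i', 'd'] :: T :: tail).length < 3
      · rw [if_pos hlen]
      · rw [if_neg hlen]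
        by_cases hemp : T = "emp".toList
        · -- then a third segment exists, so did starts with "did:emp:" — contradiction with hp
          exfalso
          have htail : tail ≠ [] := by
            intro hnil
            rw [hnil] at hlen
            simp at hlen
          have hdw : rest.dropWhile (· ≠ ':') ≠ [] := by
            intro hdwnil
            rw [pvS, hdwnil] at hS
            simp at hS
            exact htail hS.2
          obtain ⟨x, r', hx⟩ : ∃ x r', rest.dropWhile (· ≠ ':') = x :: r' := by
            cases hd : rest.dropWhile (· ≠ ':') with
            | nil => exact absurd hd hdw
            | cons x xs => exact ⟨x, xs, rfl⟩
          have hx' : x = ':' := pv_dropWhile_head hx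
          have hrest2 : rest = "emp".toList ++ ':' :: r' := by
            conv_lhs => rw [← List.takeWhile_append_dropWhile (p := (· ≠ ':')) (l := rest)]
            rw [hx, hx', ← hT, hemp]
          have hsw : PySem.Str.startswith did "did:emp:" = true := by
            simp only [PySem.Str.startswith_eq, PySem.Chars.startswith]
            rw [hrest, hrest2]
            exact List.isPrefixOf_iff_prefix.mpr ⟨r', rfl⟩
          rw [hsw] at hp
          exact Bool.true_eq_false.mp hp
        · rw [if_pos (Or.inr (by rw [pv_getD1]; exact hemp))]

-- ===== VERDICT (by name: the statement is the Claim_ definition above) =====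
theorem validate_did_format_py_spec : Claim_equal_validate_did_format_py := by
  intro did _hdom
  show validate_did_format_py did = validate_did_format_py_alt did
  cases hp : PySem.Str.startswith did "did:emp:" with
  | true =>
    have hpre : "did:emp:".toList <+: did.toList := by
      rw [PySem.Str.startswith_eq] at hp
      exact List.isPrefixOf_iff_prefix.mp hp
    obtain ⟨rest, hrest⟩ := hpre
    exact pv_main did rest hrest.symm
  | false =>
    rw [pv_off did hp, validate_did_format_py_alt, hp]
    rfl
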